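-- pv_equiv track=rewrite | github.com/Akshay01718/AI-LAB | propocession.py | resolution_solver
-- ===== SOURCE A (Python) =====
-- def resolve_clauses(clause1, clause2):
--     result = set(clause1)
--     for lit in clause2:
--         if -lit in result:
--             result.discard(-lit)
--         else:
--             result.add(lit)
--     return tuple(sorted(result))
--
-- def resolution_solver(clauses):
--     from collections import deque
--
--     queue = deque(clauses)
--
--     while len(queue) > 1:
--         first = queue.popleft()
--         second = queue.popleft()
--
--         new_clause = resolve_clauses(first, second)
--
--         if not new_clause:
--             return "Contradiction (empty clause)"
--
--         if len(new_clause) == 1: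
--             return f"Resolved to: {new_clause[0]}"
--
--         queue.appendleft(new_clause)
--
--     if len(queue) == 1 and len(queue[0]) == 1:
--         return f"Resolved to: {queue[0][0]}"
--     else:
--         return f"Final clause: {queue[0]}"
-- ===== SOURCE B (Python) =====
-- def resolve_clauses(clause1, clause2):
--     present = dict.fromkeys(clause1, True)
--     for lit in clause2:
--         if present.pop(-lit, None) is None:
--             present[lit] = True
--     return tuple(sorted(present))
--
-- def _solve(acc, rest):
--     new_clause = resolve_clauses(acc, rest[0])
--     if not new_clause:
--         return "Contradiction (empty clause)"
--     if len(new_clause) == 1: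
--         return f"Resolved to: {new_clause[0]}"
--     if len(rest) == 1:
--         return f"Final clause: {new_clause}"
--     return _solve(new_clause, rest[1:])
--
-- def resolution_solver(clauses):
--     acc = clauses[0]
--     if len(clauses) == 1:
--         if len(acc) == 1:
--             return f"Resolved to: {acc[0]}"
--         return f"Final clause: {acc}"
--     return _solve(acc, clauses[1:])
-- ===== Notes on version B (the rewrite author's own statement) =====
-- stated objective: alternative
-- what changed: The deque-driven while loop becomes direct recursion over the remaining clause list, and resolve_clauses tracks present literals in an insertion-ordered dict (pop(-lit, None) / present[lit]=True) instead of a set with discard/add.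
import Mathlib
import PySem

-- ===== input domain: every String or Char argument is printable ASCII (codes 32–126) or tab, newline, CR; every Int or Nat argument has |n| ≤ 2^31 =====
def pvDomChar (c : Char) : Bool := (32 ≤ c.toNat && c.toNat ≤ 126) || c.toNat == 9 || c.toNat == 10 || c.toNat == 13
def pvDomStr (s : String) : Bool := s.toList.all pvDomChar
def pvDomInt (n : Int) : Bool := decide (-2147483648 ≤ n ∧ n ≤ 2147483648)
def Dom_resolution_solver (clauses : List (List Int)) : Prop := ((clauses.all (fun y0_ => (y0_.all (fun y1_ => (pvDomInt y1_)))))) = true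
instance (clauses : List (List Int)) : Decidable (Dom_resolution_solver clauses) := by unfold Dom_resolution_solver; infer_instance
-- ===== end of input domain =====

-- B replaces A's deque-driven while loop by direct recursion over the clause list and
-- replaces the set-based resolve_clauses by an ordered-dict (present-keys) mechanism; same result.

-- shared f-string formatting helpers (Python str(int), list/tuple repr)
def pyIntsInner (xs : List Int) : String := PySem.Str.join ", " (xs.map PySem.Int.toStr)
def pyTupleRepr (xs : List Int) : String :=
  if xs.length = 1 then "(" ++ pyIntsInner xs ++ ",)" else "(" ++ pyIntsInner xs ++ ")"

-- ===== PORT A =====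
-- resolve_clauses of A: a Python set, discard/add per literal, then tuple(sorted(...))
def resolveClausesA (clause1 clause2 : List Int) : List Int :=
  PySem.List.sorted
    (clause2.foldl
      (fun result lit =>
        if PySem.Set.contains result (-lit) then PySem.Set.discard result (-lit)
        else PySem.Set.add result lit)
      (PySem.Set.ofList clause1))
    (fun x => x) false

-- the while len(queue) > 1 loop: first = queue.popleft(); second = queue.popleft(); maybe appendleft
def solverLoopA (first second : List Int) (rest : List (List Int)) : String :=
  let nc := resolveClausesA first second
  if nc = [] then "Contradiction (empty clause)"
  else if nc.length = 1 then "Resolved to: " ++ PySem.Int.toStr (PySem.List.pyGetD nc 0 0)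
  else
    match rest with
    | [] => "Final clause: " ++ pyTupleRepr nc   -- queue = [new_clause] (a tuple)
    | r :: rs => solverLoopA nc r rs

def resolution_solver (clauses : List (List Int)) : String :=
  match clauses with
  | [] => ""   -- Python: queue[0] raises IndexError here; excluded by Pre_
  | [c] =>     -- loop never entered; queue[0] is the original list
      if c.length = 1 then "Resolved to: " ++ PySem.Int.toStr (PySem.List.pyGetD c 0 0)
      else "Final clause: " ++ pyTupleRepr c   -- clauses arrive as tuples
  | c1 :: c2 :: rest => solverLoopA c1 c2 rest

-- ===== PORT B =====
-- resolve_clauses of B: ordered dict of present literals, pop(-lit, None) / present[lit] = True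
def resolveClausesB (clause1 clause2 : List Int) : List Int :=
  let present : PySem.Dict Int Bool := clause1.foldl (fun d k => d.insert k true) PySem.Dict.empty
  let present := clause2.foldl
    (fun d lit =>
      match d.get? (-lit) with
      | none => d.insert lit true
      | some _ => d.erase (-lit))
    present
  PySem.List.sorted present.keys (fun x => x) false

-- _solve(acc, rest): recursion over the remaining clauses (rest nonempty at every call in Source B)
def solveBLoop (acc : List Int) (rest : List (List Int)) : String :=
  match rest with
  | [] => ""   -- unreachable: Source B only calls _solve with nonempty rest (rest[0] would raise)
  | r :: rs =>
    let nc := resolveClausesB acc r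
    if nc = [] then "Contradiction (empty clause)"
    else if nc.length = 1 then "Resolved to: " ++ PySem.Int.toStr (PySem.List.pyGetD nc 0 0)
    else if rs = [] then "Final clause: " ++ pyTupleRepr nc
    else solveBLoop nc rs

def resolution_solver_alt (clauses : List (List Int)) : String :=
  match clauses with
  | [] => ""   -- Python: clauses[0] raises IndexError here; excluded by Pre_
  | acc :: rest =>
    if rest = [] then
      if acc.length = 1 then "Resolved to: " ++ PySem.Int.toStr (PySem.List.pyGetD acc 0 0)
      else "Final clause: " ++ pyTupleRepr acc   -- clauses arrive as tuples
    else solveBLoop acc rest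

-- ===== PRECONDITION & SPEC =====
-- Pre_ excludes only the empty clause list, on which both A and B raise IndexError.
def Pre_resolution_solver (clauses : List (List Int)) : Prop := clauses ≠ []
instance (clauses : List (List Int)) : Decidable (Pre_resolution_solver clauses) := by unfold Pre_resolution_solver; infer_instance
def pvWitness_resolution_solver : List (List Int) := [[1, -2], [2, 3]]

def Spec_resolution_solver (clauses : List (List Int)) (out : String) : Prop := out = resolution_solver_alt clauses
instance (clauses : List (List Int)) (out : String) : Decidable (Spec_resolution_solver clauses out) := by unfold Spec_resolution_solver; infer_instance

-- ===== CLAIM (what is proved, stated in full; the proofs are below) =====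
def Claim_equal_resolution_solver : Prop := ∀ (clauses : List (List Int)), Dom_resolution_solver clauses → Pre_resolution_solver clauses → Spec_resolution_solver clauses (resolution_solver clauses)

-- ===== LEMMAS AND PROOFS =====

-- B's dict loop over clause2 tracks exactly A's set: the dict's key list IS the set's element list.
lemma keys_loop_eq (clause2 : List Int) :
    ∀ (d : PySem.Dict Int Bool),
      (clause2.foldl
        (fun d lit =>
          match d.get? (-lit) with
          | none => d.insert lit true
          | some _ => d.erase (-lit))
        d).keys
      = clause2.foldl
          (fun result lit =>
            if PySem.Set.contains result (-lit) then PySem.Set.discard result (-lit)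
            else PySem.Set.add result lit)
          d.keys := by
  induction clause2 with
  | nil => intro d; rfl
  | cons lit rest ih =>
    intro d
    simp only [List.foldl_cons]
    rcases h : d.get? (-lit) with _ | v
    · -- -lit absent: dict insert vs set add
      have hmem : (-lit) ∉ d.keys := (PySem.Dict.get?_eq_none_iff_not_mem_keys d (-lit)).1 h
      have hc : PySem.Set.contains d.keys (-lit) = false := by
        simp [PySem.Set.contains, hmem]
      rw [ih]
      congr 1
      rw [hc]
      simp only [Bool.false_eq_true, if_false]
      by_cases hl : d.contains lit = true
      · rw [PySem.Dict.keys_insert_of_contains d true hl]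
        have hk : lit ∈ d.keys := (PySem.Dict.contains_iff_mem_keys d lit).1 hl
        simp [PySem.Set.add, PySem.Set.contains, hk]
      · have hl' : d.contains lit = false := by simpa using hl
        rw [PySem.Dict.keys_insert_of_not_contains d true hl']
        have hm : lit ∉ d.keys := fun hmm =>
          hl ((PySem.Dict.contains_iff_mem_keys d lit).2 hmm)
        simp [PySem.Set.add, PySem.Set.contains, hm]
    · -- -lit present: dict erase vs set discard
      have hmem : (-lit) ∈ d.keys := by
        by_contra hmm
        rw [(PySem.Dict.get?_eq_none_iff_not_mem_keys d (-lit)).2 hmm] at h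
        cases h
      have hc : PySem.Set.contains d.keys (-lit) = true := by
        simp [PySem.Set.contains, hmem]
      rw [ih]
      congr 1
      rw [hc]
      simp only [if_true]
      simp [PySem.Dict.erase, PySem.Dict.keys, PySem.Set.discard, List.filter_map]
      rfl

-- the two resolve_clauses agree
lemma resolve_eq (c1 c2 : List Int) : resolveClausesB c1 c2 = resolveClausesA c1 c2 := by
  unfold resolveClausesA resolveClausesB
  simp only [keys_loop_eq, PySem.Dict.keys_foldl_insert]
  simp [PySem.Set.update, PySem.Set.ofList_eq_foldl]

-- the deque loop of A and the recursion of B agree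
lemma loop_eq (rest : List (List Int)) :
    ∀ first second, solveBLoop first (second :: rest) = solverLoopA first second rest := by
  induction rest with
  | nil =>
    intro first second
    simp [solveBLoop, solverLoopA, resolve_eq]
  | cons r rs ih =>
    intro first second
    rw [solveBLoop, solverLoopA]
    simp only [resolve_eq]
    split_ifs with h1 h2 h3
    · rfl
    · rfl
    · exact absurd h3 (by simp)
    · exact ih (resolveClausesA first second) r

-- ===== VERDICT (by name: the statement is the Claim_ definition above) =====
theorem resolution_solver_spec : Claim_equal_resolution_solver := by
  intro clauses _ hpre
  unfold Spec_resolution_solver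
  match clauses with
  | [] => exact absurd rfl hpre
  | [c] => rfl
  | c1 :: c2 :: rest =>
    show resolution_solver (c1 :: c2 :: rest) = resolution_solver_alt (c1 :: c2 :: rest)
    simp [resolution_solver, resolution_solver_alt, loop_eq]
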